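-- pv_equiv track=rewrite | github.com/Jaeookk/algorithm | 삼성 SW 역량 테스트 기출 문제/스타트와링크.py | solve
-- ===== SOURCE A (Python) =====
-- def solve(depth, index, N, skill, visited, a_skill, b_skill, result):
--     if depth == N // 2:
--         a_team = 0
--         b_team = 0
--         for i in range(N):
--             if visited[i]:
--                 a_team += a_skill[i]
--             else:
--                 b_team += b_skill[i]
--
--         return min(abs(a_team - b_team), result)
--
--     for i in range(index, N):
--         visited[i] = True
--         result = solve(depth + 1, i + 1, N, skill, visited, a_skill, b_skill, result)
--         visited[i] = False
--
--     return result
-- ===== SOURCE B (Python) =====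
-- def solve(depth, index, N, skill, visited, a_skill, b_skill, result):
--     half = N // 2
--     if depth == half:
--         base = 0
--         for i in range(N):
--             base += a_skill[i] if visited[i] else -b_skill[i]
--         return min(abs(base), result)
--     k = half - depth
--     if k < 0 or N - index < k:
--         return result
--     base = 0
--     for i in range(N):
--         base += a_skill[i] if visited[i] else -b_skill[i]
--     # sums[c] = set of achievable pick-sums using exactly c of the remaining players
--     sums = [set() for _ in range(k + 1)]
--     sums[0].add(0)
--     for m in range(index, N):
--         d = a_skill[m] + b_skill[m]
--         for c in range(k, 0, -1):
--             for s in sums[c - 1]: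
--                 sums[c].add(s + d)
--     best = result
--     for s in sums[k]:
--         best = min(best, abs(base + s))
--     return best
-- ===== Notes on version B (the rewrite author's own statement) =====
-- stated objective: alternative
-- what changed: Replaces A's C(N,N/2)-leaf recursive backtracking (marking visited in place and re-summing all N slots at every leaf) by a single left-to-right subset-sum DP that keeps, per pick count, the set of achievable pick-delta sums; …
-- outside the precondition, e.g. on solve(0, 0, 2, [], [True, False], [3, 1], [2, 5], 100): A returns 1, B returns 3; on solve(0, 0, 1, [], [True], [5], [], 7): A returns 5, B returns 5
import Mathlib
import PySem

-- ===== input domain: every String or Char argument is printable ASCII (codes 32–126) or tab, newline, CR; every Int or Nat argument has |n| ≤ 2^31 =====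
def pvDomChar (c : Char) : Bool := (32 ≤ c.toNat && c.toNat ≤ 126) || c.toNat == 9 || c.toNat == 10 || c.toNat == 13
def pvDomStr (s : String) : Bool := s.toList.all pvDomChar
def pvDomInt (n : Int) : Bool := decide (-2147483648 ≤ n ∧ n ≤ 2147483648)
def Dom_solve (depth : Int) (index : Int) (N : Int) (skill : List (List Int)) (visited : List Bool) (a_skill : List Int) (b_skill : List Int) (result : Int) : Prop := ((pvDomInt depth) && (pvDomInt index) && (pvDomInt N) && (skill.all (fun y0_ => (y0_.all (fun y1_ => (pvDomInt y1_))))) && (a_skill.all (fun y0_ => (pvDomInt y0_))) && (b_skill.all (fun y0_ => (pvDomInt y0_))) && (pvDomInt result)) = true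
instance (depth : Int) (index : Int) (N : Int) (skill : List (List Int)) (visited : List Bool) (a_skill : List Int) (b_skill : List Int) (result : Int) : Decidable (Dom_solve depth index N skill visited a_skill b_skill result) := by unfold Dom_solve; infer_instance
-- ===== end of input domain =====

-- B replaces A's C(N,N/2)-leaf backtracking (recursion + in-place marking of `visited`) by a single
-- left-to-right subset-sum DP over pick counts; equivalence is about the RETURN value only — A
-- additionally mutates `visited` in place, B does not.

-- ===== PORT A =====
mutual
def solve (depth : Int) (index : Int) (N : Int) (skill : List (List Int)) (visited : List Bool) (a_skill : List Int) (b_skill : List Int) (result : Int) : Int :=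
  if depth = PySem.Int.floordiv N 2 then
    -- a_team/b_team accumulation over range(N)
    let p := (PySem.List.pyRange 0 N 1).foldl
      (fun (p : Int × Int) i =>
        if PySem.List.pyGetD visited i false then
          (p.1 + PySem.List.pyGetD a_skill i 0, p.2)
        else
          (p.1, p.2 + PySem.List.pyGetD b_skill i 0)) (0, 0)
    min |p.1 - p.2| result
  else
    (solveFor depth N skill a_skill b_skill index (visited, result)).2
termination_by ((N - index).toNat, 2)
decreasing_by apply Prod.Lex.right; omega
-- the 'for i in range(index, N): visited[i]=True; result=solve(...); visited[i]=False' loop of A,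
-- as structural recursion over the same (visited, result) state
def solveFor (depth : Int) (N : Int) (skill : List (List Int)) (a_skill : List Int) (b_skill : List Int) (i : Int) (st : List Bool × Int) : List Bool × Int :=
  if h : i < N then
    let v' := PySem.List.pySetD st.1 i true
    solveFor depth N skill a_skill b_skill (i + 1)
      (PySem.List.pySetD v' i false,
       solve (depth + 1) (i + 1) N skill v' a_skill b_skill st.2)
  else st
termination_by ((N - i).toNat, 1)
decreasing_by
  · apply Prod.Lex.left; omega
  · apply Prod.Lex.left; omega
end

-- ===== PORT B =====
def solve_alt (depth : Int) (index : Int) (N : Int) (skill : List (List Int)) (visited : List Bool) (a_skill : List Int) (b_skill : List Int) (result : Int) : Int :=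
  let half := PySem.Int.floordiv N 2
  if depth = half then
    let base := (PySem.List.pyRange 0 N 1).foldl
      (fun (acc : Int) i => acc + (if PySem.List.pyGetD visited i false then PySem.List.pyGetD a_skill i 0 else -PySem.List.pyGetD b_skill i 0)) 0
    min |base| result
  else
    let k := half - depth
    if k < 0 ∨ N - index < k then result
    else
      let base := (PySem.List.pyRange 0 N 1).foldl
        (fun (acc : Int) i => acc + (if PySem.List.pyGetD visited i false then PySem.List.pyGetD a_skill i 0 else -PySem.List.pyGetD b_skill i 0)) 0
      -- sums = [set() for _ in range(k+1)]; sums[0].add(0)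
      let sums0 : List (PySem.Set Int) := (List.replicate (k.toNat + 1) (PySem.Set.empty : PySem.Set Int)).set 0 (PySem.Set.add PySem.Set.empty 0)
      let sums := (PySem.List.pyRange index N 1).foldl
        (fun (sm : List (PySem.Set Int)) m =>
          let d := PySem.List.pyGetD a_skill m 0 + PySem.List.pyGetD b_skill m 0
          (PySem.List.pyRange k 0 (-1)).foldl
            (fun (sm : List (PySem.Set Int)) c =>
              sm.set c.toNat
                ((sm.getD (c - 1).toNat PySem.Set.empty).foldl
                  (fun (t : PySem.Set Int) s => PySem.Set.add t (s + d))
                  (sm.getD c.toNat PySem.Set.empty))) sm) sums0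
      (sums.getD k.toNat PySem.Set.empty).foldl (fun (bb : Int) s => min bb |base + s|) result

-- ===== PRECONDITION & SPEC =====
-- Pre_ excludes the inputs on which A raises IndexError (lists shorter than the slots the traversal
-- touches), inputs reaching Python's negative-index wraparound (index < 0 with index < N and
-- depth ≠ N//2), short-list inputs where the base case happens to read only the slots that exist,
-- and — when the pick loop actually runs — inputs whose `visited` already holds True inside
-- [index, N): those are mid-recursion states in which A's in-place marking clears such flags before
-- the leaf reads them, so A's value there is an artefact of its mutation scheme; B reads `visited`
-- as the fixed set of already-picked players.
def Pre_solve (depth : Int) (index : Int) (N : Int) (skill : List (List Int)) (visited : List Bool) (a_skill : List Int) (b_skill : List Int) (result : Int) : Prop :=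
  (depth = PySem.Int.floordiv N 2 ∧
     N ≤ (visited.length : Int) ∧ N ≤ (a_skill.length : Int) ∧ N ≤ (b_skill.length : Int)) ∨
  (depth ≠ PySem.Int.floordiv N 2 ∧
     (N ≤ index ∨
       (0 ≤ index ∧ N ≤ (visited.length : Int) ∧
         ((0 < PySem.Int.floordiv N 2 - depth ∧ PySem.Int.floordiv N 2 - depth ≤ N - index) →
           (N ≤ (a_skill.length : Int) ∧ N ≤ (b_skill.length : Int) ∧
            ∀ j ∈ PySem.List.pyRange index N 1, PySem.List.pyGetD visited j false = false)))))
instance (depth : Int) (index : Int) (N : Int) (skill : List (List Int)) (visited : List Bool) (a_skill : List Int) (b_skill : List Int) (result : Int) : Decidable (Pre_solve depth index N skill visited a_skill b_skill result) := by unfold Pre_solve; infer_instance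

def pvWitness_solve : Int × Int × Int × List (List Int) × List Bool × List Int × List Int × Int :=
  (0, 0, 4, [], [false, false, false, false], [1, 2, 3, 4], [4, 3, 2, 1], 1000)

def Spec_solve (depth : Int) (index : Int) (N : Int) (skill : List (List Int)) (visited : List Bool) (a_skill : List Int) (b_skill : List Int) (result : Int) (out : Int) : Prop := out = solve_alt depth index N skill visited a_skill b_skill result
instance (depth : Int) (index : Int) (N : Int) (skill : List (List Int)) (visited : List Bool) (a_skill : List Int) (b_skill : List Int) (result : Int) (out : Int) : Decidable (Spec_solve depth index N skill visited a_skill b_skill result out) := by unfold Spec_solve; infer_instance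

-- ===== CLAIM (what is proved, stated in full; the proofs are below) =====
def Claim_equal_solve : Prop := ∀ (depth : Int) (index : Int) (N : Int) (skill : List (List Int)) (visited : List Bool) (a_skill : List Int) (b_skill : List Int) (result : Int), Dom_solve depth index N skill visited a_skill b_skill result → Pre_solve depth index N skill visited a_skill b_skill result → Spec_solve depth index N skill visited a_skill b_skill result (solve depth index N skill visited a_skill b_skill result)

-- ===== LEMMAS AND PROOFS =====

-- spec-side helpers
def tvalS (v : List Bool) (a b : List Int) (j : Int) : Int :=
  if PySem.List.pyGetD v j false then PySem.List.pyGetD a j 0 else -PySem.List.pyGetD b j 0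
def dvalS (a b : List Int) (j : Int) : Int := PySem.List.pyGetD a j 0 + PySem.List.pyGetD b j 0
def baseSS (v : List Bool) (a b : List Int) (N : Int) : Int :=
  ((PySem.List.pyRange 0 N 1).map (tvalS v a b)).sum
def qsum (v : List Bool) (a b : List Int) (lo hi : Int) : Int :=
  ((PySem.List.pyRange lo hi 1).map (fun j => if PySem.List.pyGetD v j false then dvalS a b j else 0)).sum
def subsN : Nat → List Int → List (List Int)
  | 0, _ => [[]]
  | _+1, [] => []
  | n+1, x :: t => ((subsN n t).map (x :: ·)) ++ subsN (n+1) t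
def wval (v : List Bool) (a b : List Int) (N lo : Int) (S : List Int) : Int :=
  match S with
  | [] => baseSS v a b N
  | S@(_ :: _) => baseSS v a b N + (S.map (dvalS a b)).sum - qsum v a b lo (S.getLastD 0 + 1)
def specFold (N : Int) (a b : List Int) (depth lo : Int) (v : List Bool) (r : Int) : Int :=
  if PySem.Int.floordiv N 2 - depth < 0 then r
  else ((subsN (PySem.Int.floordiv N 2 - depth).toNat (PySem.List.pyRange lo N 1)).map
          (fun S => |wval v a b N lo S|)).foldl min r

-- generic fold lemmas
theorem foldadd (L : List Int) (s : Int) (t : Int → Int) :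
    L.foldl (fun acc i => acc + t i) s = s + (L.map t).sum := by
  induction L generalizing s with
  | nil => simp
  | cons x xs ih => simp [ih, add_assoc]

theorem pairfold_sub (L : List Int) (p : Int × Int) (c : Int → Bool) (fa fb : Int → Int) :
    (L.foldl (fun (p : Int × Int) i => if c i then (p.1 + fa i, p.2) else (p.1, p.2 + fb i)) p).1
      - (L.foldl (fun (p : Int × Int) i => if c i then (p.1 + fa i, p.2) else (p.1, p.2 + fb i)) p).2
    = p.1 - p.2 + (L.map (fun i => if c i then fa i else -fb i)).sum := by
  induction L generalizing p with
  | nil => simp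
  | cons x xs ih =>
      by_cases h : c x <;> simp [h, ih] <;> ring

theorem foldmin_map (L : List Int) (h : Int → Int) (acc : Int) :
    L.foldl (fun bb s => min bb (h s)) acc = (L.map h).foldl min acc := by
  induction L generalizing acc with
  | nil => rfl
  | cons x xs ih => simp [ih]

theorem foldmin_mem_eq (L1 L2 : List Int) (acc : Int) (h : ∀ x, x ∈ L1 ↔ x ∈ L2) :
    L1.foldl min acc = L2.foldl min acc := by
  apply le_antisymm
  · rcases PySem.List.foldl_min_mem (t := L2) (a := acc) with h2 | h2
    · rw [h2]; exact (PySem.List.foldl_min_le L1 acc).1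
    · exact (PySem.List.foldl_min_le L1 acc).2 _ ((h _).mpr h2)
  · rcases PySem.List.foldl_min_mem (t := L1) (a := acc) with h1 | h1
    · rw [h1]; exact (PySem.List.foldl_min_le L2 acc).1
    · exact (PySem.List.foldl_min_le L2 acc).2 _ ((h _).mp h1)

theorem mem_foldl_setadd (L : List Int) (t : PySem.Set Int) (f : Int → Int) (x : Int) :
    x ∈ L.foldl (fun t s => PySem.Set.add t (f s)) t ↔ x ∈ t ∨ ∃ s ∈ L, x = f s := by
  induction L generalizing t with
  | nil => simp
  | cons y ys ih =>
      simp only [List.foldl_cons, ih, PySem.Set.mem_add, List.mem_cons]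
      constructor
      · rintro (⟨h | h⟩ | ⟨s, hs, rfl⟩)
        · exact Or.inl h
        · exact Or.inr ⟨y, Or.inl rfl, h⟩
        · exact Or.inr ⟨s, Or.inr hs, rfl⟩
      · rintro (h | ⟨s, (rfl | hs), rfl⟩)
        · exact Or.inl (Or.inl h)
        · exact Or.inl (Or.inr rfl)
        · exact Or.inr ⟨s, hs, rfl⟩

-- subsN lemmas
theorem subsN_zero (l : List Int) : subsN 0 l = [[]] := by cases l <;> rfl

theorem mem_subsN {S l : List Int} {n : Nat} : S ∈ subsN n l ↔ S.Sublist l ∧ S.length = n := by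
  induction l generalizing S n with
  | nil => cases n with
    | zero =>
        simp only [subsN, List.mem_singleton]
        constructor
        · rintro rfl; simp
        · rintro ⟨h, h2⟩; simpa using List.sublist_nil.mp h
    | succ m =>
        simp only [subsN, List.not_mem_nil, false_iff, not_and]
        intro h; have := List.sublist_nil.mp h; subst this; simp
  | cons y t ih =>
      cases n with
      | zero =>
          simp only [subsN, List.mem_singleton]
          constructor
          · rintro rfl; simp
          · rintro ⟨h, h2⟩; exact (List.length_eq_zero_iff.mp h2).symm ▸ rfl
      | succ m =>
          simp only [subsN, List.mem_append, List.mem_map, ih, List.sublist_cons_iff]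
          constructor
          · rintro (⟨S', ⟨hs, hl⟩, rfl⟩ | ⟨hs, hl⟩)
            · exact ⟨Or.inr ⟨S', rfl, hs⟩, by simp [hl]⟩
            · exact ⟨Or.inl hs, hl⟩
          · rintro ⟨hs | ⟨r, rfl, hr⟩, hl⟩
            · exact Or.inr ⟨hs, hl⟩
            · exact Or.inl ⟨r, ⟨hr, by simpa using hl⟩, rfl⟩

theorem subsN_sublist {S l : List Int} {n : Nat} (h : S ∈ subsN n l) : S.Sublist l :=
  (mem_subsN.mp h).1

theorem subsN_eq_nil {l : List Int} {n : Nat} (h : l.length < n) : subsN n l = [] := by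
  rw [List.eq_nil_iff_forall_not_mem]
  intro S hS
  rcases mem_subsN.mp hS with ⟨hs, hl⟩
  have := hs.length_le
  omega

theorem mem_subsN_ne_nil {S l : List Int} {n : Nat} (h : S ∈ subsN (n+1) l) : S ≠ [] := by
  rcases mem_subsN.mp h with ⟨_, hl⟩
  intro hS; subst hS; simp at hl

theorem sublist_snoc_iff (S l : List Int) (x : Int) :
    S.Sublist (l ++ [x]) ↔ S.Sublist l ∨ ∃ r, S = r ++ [x] ∧ r.Sublist l := by
  constructor
  · intro h
    rcases List.sublist_append_iff.mp h with ⟨r, s, rfl, hr, hs⟩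
    rcases (List.sublist_singleton.mp hs) with rfl | rfl
    · exact Or.inl (by simpa using hr)
    · exact Or.inr ⟨r, rfl, hr⟩
  · rintro (h | ⟨r, rfl, hr⟩)
    · exact h.trans (List.sublist_append_left _ _)
    · exact hr.append (List.Sublist.refl _)

theorem mem_subsN_snoc (n : Nat) (l : List Int) (x : Int) (S : List Int) :
    S ∈ subsN (n+1) (l ++ [x]) ↔ S ∈ subsN (n+1) l ∨ ∃ S' ∈ subsN n l, S = S' ++ [x] := by
  simp only [mem_subsN, sublist_snoc_iff]
  constructor
  · rintro ⟨hs | ⟨r, rfl, hr⟩, hl⟩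
    · exact Or.inl ⟨hs, hl⟩
    · exact Or.inr ⟨r, ⟨hr, by simpa using hl⟩, rfl⟩
  · rintro (⟨hs, hl⟩ | ⟨S', ⟨hs, hl⟩, rfl⟩)
    · exact ⟨Or.inl hs, hl⟩
    · exact ⟨Or.inr ⟨S', rfl, hs⟩, by simp [hl]⟩

theorem getLastD_mem {l : List Int} (h : l ≠ []) : l.getLastD 0 ∈ l := by
  rw [List.getLastD_eq_getLast?, List.getLast?_eq_some_getLast h]
  exact List.getLast_mem h

-- pointwise effect of visited[i] = bb on the spec quantities
theorem pyGetD_pySetD_eq (v : List Bool) (i : Int) (bb : Bool) (h0 : 0 ≤ i) (h : i < (v.length : Int)) :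
    PySem.List.pyGetD (PySem.List.pySetD v i bb) i false = bb := by
  rw [PySem.List.pySetD_of_nonneg _ _ h0]
  have hi : i = ((i.toNat : Nat) : Int) := (Int.toNat_of_nonneg h0).symm
  rw [hi, PySem.List.pyGetD_natCast]
  simp only [Int.toNat_natCast]
  rw [List.getD_eq_getElem?_getD, List.getElem?_set_self (by omega)]
  rfl

theorem pyGetD_pySetD_ne (v : List Bool) (i j : Int) (bb : Bool) (h0 : 0 ≤ i) (hj : 0 ≤ j) (hne : j ≠ i) :
    PySem.List.pyGetD (PySem.List.pySetD v i bb) j false = PySem.List.pyGetD v j false := by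
  rw [PySem.List.pySetD_of_nonneg _ _ h0]
  have hjj : j = ((j.toNat : Nat) : Int) := (Int.toNat_of_nonneg hj).symm
  rw [hjj, PySem.List.pyGetD_natCast, PySem.List.pyGetD_natCast]
  rw [List.getD_eq_getElem?_getD, List.getD_eq_getElem?_getD, List.getElem?_set_ne (by omega)]

theorem tvalS_pySetD_ne (v : List Bool) (a b : List Int) (i j : Int) (bb : Bool)
    (h0 : 0 ≤ i) (hj : 0 ≤ j) (hne : j ≠ i) :
    tvalS (PySem.List.pySetD v i bb) a b j = tvalS v a b j := by
  unfold tvalS; rw [pyGetD_pySetD_ne v i j bb h0 hj hne]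

theorem baseS_set (v : List Bool) (a b : List Int) (N i : Int) (bb : Bool)
    (h0 : 0 ≤ i) (hiN : i < N) (hlen : i < (v.length : Int)) :
    baseSS (PySem.List.pySetD v i bb) a b N
      = baseSS v a b N + (if bb then PySem.List.pyGetD a i 0 else -PySem.List.pyGetD b i 0) - tvalS v a b i := by
  unfold baseSS
  rw [PySem.List.pyRange_one_append 0 i N h0 (le_of_lt hiN),
      PySem.List.pyRange_one_cons hiN]
  simp only [List.map_append, List.map_cons, List.sum_append, List.sum_cons]
  have e1 : (PySem.List.pyRange 0 i 1).map (tvalS (PySem.List.pySetD v i bb) a b)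
      = (PySem.List.pyRange 0 i 1).map (tvalS v a b) := by
    apply List.map_congr_left
    intro j hjm
    have hb := PySem.List.mem_pyRange_one.mp hjm
    exact tvalS_pySetD_ne v a b i j bb h0 hb.1 (by omega)
  have e2 : (PySem.List.pyRange (i+1) N 1).map (tvalS (PySem.List.pySetD v i bb) a b)
      = (PySem.List.pyRange (i+1) N 1).map (tvalS v a b) := by
    apply List.map_congr_left
    intro j hjm
    have hb := PySem.List.mem_pyRange_one.mp hjm
    exact tvalS_pySetD_ne v a b i j bb h0 (by omega) (by omega)
  have e3 : tvalS (PySem.List.pySetD v i bb) a b i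
      = (if bb then PySem.List.pyGetD a i 0 else -PySem.List.pyGetD b i 0) := by
    unfold tvalS; rw [pyGetD_pySetD_eq v i bb h0 hlen]
  rw [e1, e2, e3]
  ring

theorem qsum_pySetD_lt (v : List Bool) (a b : List Int) (i lo hi : Int) (bb : Bool)
    (h0 : 0 ≤ i) (hlo : i < lo) :
    qsum (PySem.List.pySetD v i bb) a b lo hi = qsum v a b lo hi := by
  unfold qsum
  congr 1
  apply List.map_congr_left
  intro j hjm
  have hb := PySem.List.mem_pyRange_one.mp hjm
  rw [pyGetD_pySetD_ne v i j bb h0 (by omega) (by omega)]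

theorem qsum_cons (v : List Bool) (a b : List Int) (lo hi : Int) (h : lo < hi) :
    qsum v a b lo hi
      = (if PySem.List.pyGetD v lo false then dvalS a b lo else 0) + qsum v a b (lo+1) hi := by
  unfold qsum
  rw [PySem.List.pyRange_one_cons h]
  simp

theorem getLastD_irrel {l : List Int} (h : l ≠ []) (d1 d2 : Int) : l.getLastD d1 = l.getLastD d2 := by
  rw [List.getLastD_eq_getLast?, List.getLastD_eq_getLast?, List.getLast?_eq_some_getLast h]
  rfl

theorem qsum_self (v : List Bool) (a b : List Int) (lo : Int) : qsum v a b lo lo = 0 := by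
  unfold qsum
  rw [PySem.List.pyRange_one_eq_nil (le_refl lo)]
  simp

theorem Wa (v : List Bool) (a b : List Int) (N index : Int)
    (h0 : 0 ≤ index) (hiN : index < N) (hlen : N ≤ (v.length : Int))
    (S' : List Int) (hS' : ∀ j ∈ S', index + 1 ≤ j ∧ j < N) :
    wval v a b N index (index :: S')
      = wval (PySem.List.pySetD v index true) a b N (index + 1) S' := by
  cases S' with
  | nil =>
      show baseSS v a b N + ([index].map (dvalS a b)).sum - qsum v a b index (([index].getLastD 0) + 1)
        = baseSS (PySem.List.pySetD v index true) a b N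
      rw [baseS_set v a b N index true h0 hiN (by omega)]
      have hgl : ([index] : List Int).getLastD 0 = index := rfl
      rw [hgl, qsum_cons v a b index (index + 1) (by omega), qsum_self]
      simp only [List.map_cons, List.map_nil, List.sum_cons, List.sum_nil]
      unfold tvalS dvalS
      by_cases hv : PySem.List.pyGetD v index false <;> simp [hv] <;> ring
  | cons x t =>
      have hne : (x :: t) ≠ ([] : List Int) := by simp
      have hml : ((x :: t).getLastD 0) ∈ (x :: t) := getLastD_mem hne
      have hmb := hS' _ hml
      show baseSS v a b N + ((index :: x :: t).map (dvalS a b)).sum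
            - qsum v a b index (((index :: x :: t).getLastD 0) + 1)
        = baseSS (PySem.List.pySetD v index true) a b N + ((x :: t).map (dvalS a b)).sum
            - qsum (PySem.List.pySetD v index true) a b (index + 1) (((x :: t).getLastD 0) + 1)
      have hl1 : (index :: x :: t).getLastD 0 = (x :: t).getLastD 0 := by
        show (x :: t).getLastD index = (x :: t).getLastD 0
        exact getLastD_irrel hne index 0
      rw [hl1, qsum_pySetD_lt v a b index (index + 1) _ true h0 (by omega),
          baseS_set v a b N index true h0 hiN (by omega),
          qsum_cons v a b index _ (by omega)]
      simp only [List.map_cons, List.sum_cons]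
      unfold tvalS dvalS
      by_cases hv : PySem.List.pyGetD v index false <;> simp [hv] <;> ring

theorem Wb (v : List Bool) (a b : List Int) (N index : Int)
    (h0 : 0 ≤ index) (hiN : index < N) (hlen : N ≤ (v.length : Int))
    (S : List Int) (hS : ∀ j ∈ S, index + 1 ≤ j ∧ j < N) (hne : S ≠ []) :
    wval v a b N index S = wval (PySem.List.pySetD v index false) a b N (index + 1) S := by
  cases S with
  | nil => exact absurd rfl hne
  | cons x t =>
      have hne' : (x :: t) ≠ ([] : List Int) := by simp
      have hml : ((x :: t).getLastD 0) ∈ (x :: t) := getLastD_mem hne'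
      have hmb := hS _ hml
      show baseSS v a b N + ((x :: t).map (dvalS a b)).sum
            - qsum v a b index (((x :: t).getLastD 0) + 1)
        = baseSS (PySem.List.pySetD v index false) a b N + ((x :: t).map (dvalS a b)).sum
            - qsum (PySem.List.pySetD v index false) a b (index + 1) (((x :: t).getLastD 0) + 1)
      rw [qsum_pySetD_lt v a b index (index + 1) _ false h0 (by omega),
          baseS_set v a b N index false h0 hiN (by omega),
          qsum_cons v a b index _ (by omega)]
      unfold tvalS dvalS
      by_cases hv : PySem.List.pyGetD v index false <;> simp [hv] <;> ring

theorem specFold_base (N : Int) (a b : List Int) (depth lo : Int) (v : List Bool) (r : Int)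
    (hd : depth = PySem.Int.floordiv N 2) :
    specFold N a b depth lo v r = min r |baseSS v a b N| := by
  unfold specFold
  rw [if_neg (by omega)]
  have hk : (PySem.Int.floordiv N 2 - depth).toNat = 0 := by omega
  rw [hk, subsN_zero]
  simp [wval]

theorem specFold_neg (N : Int) (a b : List Int) (depth lo : Int) (v : List Bool) (r : Int)
    (hk : PySem.Int.floordiv N 2 - depth < 0) :
    specFold N a b depth lo v r = r := by
  unfold specFold
  rw [if_pos hk]

theorem specFold_empty (N : Int) (a b : List Int) (depth lo : Int) (v : List Bool) (r : Int)
    (hd : ¬ depth = PySem.Int.floordiv N 2) (hlo : N ≤ lo) :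
    specFold N a b depth lo v r = r := by
  unfold specFold
  by_cases hk : PySem.Int.floordiv N 2 - depth < 0
  · rw [if_pos hk]
  · have hkp : 0 < (PySem.Int.floordiv N 2 - depth).toNat := by omega
    rw [if_neg hk, PySem.List.pyRange_one_eq_nil hlo,
      subsN_eq_nil (n := (PySem.Int.floordiv N 2 - depth).toNat) (by simpa using hkp)]
    simp

theorem spec_step (N : Int) (a b : List Int) (depth index : Int) (v : List Bool) (r : Int)
    (hd : ¬ depth = PySem.Int.floordiv N 2) (h0 : 0 ≤ index) (hI : index < N)
    (hlen : N ≤ (v.length : Int)) :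
    specFold N a b depth index v r
      = specFold N a b depth (index + 1) (PySem.List.pySetD v index false)
          (specFold N a b (depth + 1) (index + 1) (PySem.List.pySetD v index true) r) := by
  by_cases hk : PySem.Int.floordiv N 2 - depth < 0
  · rw [specFold_neg _ _ _ _ _ _ _ hk, specFold_neg _ _ _ _ _ _ _ (by omega),
      specFold_neg _ _ _ _ _ _ _ (by omega)]
  · have hkpos : 0 < PySem.Int.floordiv N 2 - depth := by omega
    obtain ⟨kk, hkk⟩ : ∃ kk, (PySem.Int.floordiv N 2 - depth).toNat = kk + 1 :=
      ⟨(PySem.Int.floordiv N 2 - depth).toNat - 1, by omega⟩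
    unfold specFold
    rw [if_neg hk, if_neg (by omega), hkk]
    have hk1 : (PySem.Int.floordiv N 2 - (depth + 1)).toNat = kk := by omega
    rw [hk1]
    rw [PySem.List.pyRange_one_cons hI]
    show ((subsN (kk+1) (index :: PySem.List.pyRange (index+1) N 1)).map
            (fun S => |wval v a b N index S|)).foldl min r = _
    rw [show subsN (kk+1) (index :: PySem.List.pyRange (index+1) N 1)
          = ((subsN kk (PySem.List.pyRange (index+1) N 1)).map (index :: ·))
            ++ subsN (kk+1) (PySem.List.pyRange (index+1) N 1) from rfl]
    rw [List.map_append, List.foldl_append, List.map_map]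
    have e1 : (subsN kk (PySem.List.pyRange (index+1) N 1)).map
                ((fun S => |wval v a b N index S|) ∘ (index :: ·))
        = (subsN kk (PySem.List.pyRange (index+1) N 1)).map
            (fun S' => |wval (PySem.List.pySetD v index true) a b N (index+1) S'|) := by
      apply List.map_congr_left
      intro S' hS'
      have hsub := subsN_sublist hS'
      have hbnd : ∀ j ∈ S', index + 1 ≤ j ∧ j < N := by
        intro j hj
        exact PySem.List.mem_pyRange_one.mp (hsub.subset hj)
      simp only [Function.comp_apply]
      rw [Wa v a b N index h0 hI hlen S' hbnd]
    have e2 : (subsN (kk+1) (PySem.List.pyRange (index+1) N 1)).map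
                (fun S => |wval v a b N index S|)
        = (subsN (kk+1) (PySem.List.pyRange (index+1) N 1)).map
            (fun S => |wval (PySem.List.pySetD v index false) a b N (index+1) S|) := by
      apply List.map_congr_left
      intro S hS
      have hsub := subsN_sublist hS
      have hbnd : ∀ j ∈ S, index + 1 ≤ j ∧ j < N := by
        intro j hj
        exact PySem.List.mem_pyRange_one.mp (hsub.subset hj)
      rw [Wb v a b N index h0 hI hlen S hbnd (mem_subsN_ne_nil hS)]
    rw [e1, e2, if_neg (show ¬ (PySem.Int.floordiv N 2 - (depth+1) < 0) by omega)]

theorem solveFor_eq (depth N : Int) (skill : List (List Int)) (a b : List Int) :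
    ∀ (M : Nat) (i : Int) (st : List Bool × Int), (N - i).toNat ≤ M →
      solveFor depth N skill a b i st
        = (PySem.List.pyRange i N 1).foldl
            (fun (st : List Bool × Int) j =>
              (PySem.List.pySetD (PySem.List.pySetD st.1 j true) j false,
               solve (depth + 1) (j + 1) N skill (PySem.List.pySetD st.1 j true) a b st.2)) st := by
  intro M
  induction M with
  | zero =>
      intro i st hM
      rw [solveFor, dif_neg (by omega), PySem.List.pyRange_one_eq_nil (by omega)]
      rfl
  | succ M ih =>
      intro i st hM
      by_cases h : i < N
      · rw [solveFor, dif_pos h, PySem.List.pyRange_one_cons h, List.foldl_cons,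
            ih (i + 1) _ (by omega)]
      · rw [solveFor, dif_neg h, PySem.List.pyRange_one_eq_nil (by omega)]
        rfl

theorem solve_unfold (depth lo N : Int) (skill : List (List Int)) (v : List Bool)
    (a b : List Int) (r : Int) (hd : ¬ depth = PySem.Int.floordiv N 2) :
    solve depth lo N skill v a b r
      = ((PySem.List.pyRange lo N 1).foldl
          (fun (st : List Bool × Int) i =>
            (PySem.List.pySetD (PySem.List.pySetD st.1 i true) i false,
             solve (depth + 1) (i + 1) N skill (PySem.List.pySetD st.1 i true) a b st.2)) (v, r)).2 := by
  rw [solve, if_neg hd, solveFor_eq depth N skill a b (N - lo).toNat lo (v, r) (le_refl _)]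

theorem pySetD_pySetD (v : List Bool) (i : Int) (x y : Bool) (h0 : 0 ≤ i) :
    PySem.List.pySetD (PySem.List.pySetD v i x) i y = PySem.List.pySetD v i y := by
  rw [PySem.List.pySetD_of_nonneg _ _ h0, PySem.List.pySetD_of_nonneg _ _ h0,
      PySem.List.pySetD_of_nonneg _ _ h0, List.set_set]

theorem solveA_base (depth index N : Int) (skill : List (List Int)) (v : List Bool)
    (a b : List Int) (r : Int) (hd : depth = PySem.Int.floordiv N 2) :
    solve depth index N skill v a b r = specFold N a b depth index v r := by
  conv_lhs => rw [solve]
  rw [if_pos hd, specFold_base N a b depth index v r hd]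
  show min |((PySem.List.pyRange 0 N 1).foldl _ ((0 : Int), (0 : Int))).1 -
         ((PySem.List.pyRange 0 N 1).foldl _ ((0 : Int), (0 : Int))).2| r = _
  rw [pairfold_sub (PySem.List.pyRange 0 N 1) ((0 : Int), (0 : Int))
        (fun i => PySem.List.pyGetD v i false)
        (fun i => PySem.List.pyGetD a i 0) (fun i => PySem.List.pyGetD b i 0)]
  rw [min_comm]
  show min r |0 - 0 + baseSS v a b N| = min r |baseSS v a b N|
  norm_num

theorem solveA_empty (depth index N : Int) (skill : List (List Int)) (v : List Bool)
    (a b : List Int) (r : Int) (hd : ¬ depth = PySem.Int.floordiv N 2) (hI : N ≤ index) :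
    solve depth index N skill v a b r = r := by
  rw [solve_unfold depth index N skill v a b r hd, PySem.List.pyRange_one_eq_nil hI]
  rfl

theorem solveA_eq (N : Int) (skill : List (List Int)) (a b : List Int) :
    ∀ (M : Nat) (depth index : Int) (v : List Bool) (r : Int),
      (N - index).toNat ≤ M → 0 ≤ index → N ≤ (v.length : Int) →
      solve depth index N skill v a b r = specFold N a b depth index v r := by
  intro M
  induction M with
  | zero =>
      intro depth index v r hM h0 hlen
      by_cases hd : depth = PySem.Int.floordiv N 2
      · exact solveA_base depth index N skill v a b r hd
      · have hI : ¬ index < N := by omega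
        rw [solveA_empty depth index N skill v a b r hd (by omega),
            specFold_empty N a b depth index v r hd (by omega)]
  | succ M ih =>
      intro depth index v r hM h0 hlen
      by_cases hd : depth = PySem.Int.floordiv N 2
      · exact solveA_base depth index N skill v a b r hd
      · by_cases hI : index < N
        · rw [solve_unfold depth index N skill v a b r hd,
              PySem.List.pyRange_one_cons hI, List.foldl_cons]
          rw [← solve_unfold depth (index + 1) N skill _ a b _ hd]
          rw [pySetD_pySetD v index true false h0]
          rw [ih (depth + 1) (index + 1) (PySem.List.pySetD v index true) r (by omega)
                (by omega) (by rw [PySem.List.length_pySetD]; exact hlen)]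
          rw [ih depth (index + 1) (PySem.List.pySetD v index false) _ (by omega)
                (by omega) (by rw [PySem.List.length_pySetD]; exact hlen)]
          exact (spec_step N a b depth index v r hd h0 hI hlen).symm
        · rw [solveA_empty depth index N skill v a b r hd (by omega),
              specFold_empty N a b depth index v r hd (by omega)]

-- ===== B-side proofs =====
def addlist (L : List Int) (d : Int) (t0 : PySem.Set Int) : PySem.Set Int :=
  L.foldl (fun (t : PySem.Set Int) s => PySem.Set.add t (s + d)) t0

theorem mem_addlist (L : List Int) (d : Int) (t0 : PySem.Set Int) (x : Int) :
    x ∈ addlist L d t0 ↔ x ∈ t0 ∨ ∃ s ∈ L, x = s + d := by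
  unfold addlist
  exact mem_foldl_setadd L t0 (fun s => s + d) x

theorem mem_map_congr {α β : Type} [DecidableEq β] (L1 L2 : List α) (f : α → β)
    (h : ∀ y, y ∈ L1 ↔ y ∈ L2) (x : β) : x ∈ L1.map f ↔ x ∈ L2.map f := by
  simp only [List.mem_map]
  constructor
  · rintro ⟨y, hy, rfl⟩; exact ⟨y, (h y).mp hy, rfl⟩
  · rintro ⟨y, hy, rfl⟩; exact ⟨y, (h y).mpr hy, rfl⟩

theorem getD_set_self (sm : List (PySem.Set Int)) (n : Nat) (y : PySem.Set Int)
    (h : n < sm.length) : (sm.set n y).getD n PySem.Set.empty = y := by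
  rw [List.getD_eq_getElem?_getD, List.getElem?_set_self h]; rfl

theorem getD_set_ne (sm : List (PySem.Set Int)) (n m : Nat) (y : PySem.Set Int)
    (h : n ≠ m) : (sm.set n y).getD m PySem.Set.empty = sm.getD m PySem.Set.empty := by
  rw [List.getD_eq_getElem?_getD, List.getD_eq_getElem?_getD, List.getElem?_set_ne h]

-- one inner countdown pass `for c in range(k, 0, -1)` merges sums[c-1]+d into sums[c]
theorem inner_char (d : Int) :
    ∀ (tn : Nat) (t : Int) (sm : List (PySem.Set Int)), t.toNat = tn →
      t < (sm.length : Int) →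
      (∀ j : Nat,
        ((PySem.List.pyRange t 0 (-1)).foldl
          (fun (sm : List (PySem.Set Int)) c =>
            sm.set c.toNat
              ((sm.getD (c - 1).toNat PySem.Set.empty).foldl
                (fun (t : PySem.Set Int) s => PySem.Set.add t (s + d))
                (sm.getD c.toNat PySem.Set.empty))) sm).getD j PySem.Set.empty
        = if 1 ≤ j ∧ (j : Int) ≤ t
            then addlist (sm.getD (j-1) PySem.Set.empty) d (sm.getD j PySem.Set.empty)
            else sm.getD j PySem.Set.empty) ∧
      ((PySem.List.pyRange t 0 (-1)).foldl
          (fun (sm : List (PySem.Set Int)) c =>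
            sm.set c.toNat
              ((sm.getD (c - 1).toNat PySem.Set.empty).foldl
                (fun (t : PySem.Set Int) s => PySem.Set.add t (s + d))
                (sm.getD c.toNat PySem.Set.empty))) sm).length = sm.length := by
  intro tn
  induction tn with
  | zero =>
      intro t sm htn hlen
      rw [PySem.List.pyRange_neg_one_eq_nil (by omega)]
      constructor
      · intro j
        rw [if_neg (by omega), List.foldl_nil]
      · rfl
  | succ tn ih =>
      intro t sm htn hlen
      have ht0 : 1 ≤ t := by omega
      rw [PySem.List.pyRange_neg_one_cons (by omega : (0 : Int) < t), List.foldl_cons]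
      set X := (sm.getD (t - 1).toNat PySem.Set.empty).foldl
          (fun (t : PySem.Set Int) s => PySem.Set.add t (s + d))
          (sm.getD t.toNat PySem.Set.empty) with hX
      have hset : ((sm.set t.toNat X).length : Int) = (sm.length : Int) := by simp
      obtain ⟨ihj, ihlen⟩ := ih (t - 1) (sm.set t.toNat X) (by omega) (by rw [hset]; omega)
      constructor
      · intro j
        rw [ihj j]
        by_cases hj1 : 1 ≤ j ∧ (j : Int) ≤ t - 1
        · rw [if_pos hj1, if_pos (by omega),
            getD_set_ne sm t.toNat (j-1) X (by omega),
            getD_set_ne sm t.toNat j X (by omega)]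
        · rw [if_neg hj1]
          by_cases hj2 : (j : Int) = t
          · have hjn : j = t.toNat := by omega
            subst hjn
            rw [getD_set_self sm t.toNat X (by omega), if_pos (by constructor <;> omega)]
            have hj1n : t.toNat - 1 = (t - 1).toNat := by omega
            rw [hj1n, hX]
            unfold addlist
            rfl
          · rw [getD_set_ne sm t.toNat j X (by omega), if_neg (by omega)]
      · rw [ihlen]; simp

theorem specFold_short (N : Int) (a b : List Int) (depth lo : Int) (v : List Bool) (r : Int)
    (hd : ¬ depth = PySem.Int.floordiv N 2) (hk : ¬ PySem.Int.floordiv N 2 - depth < 0)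
    (hshort : N - lo < PySem.Int.floordiv N 2 - depth) :
    specFold N a b depth lo v r = r := by
  unfold specFold
  rw [if_neg hk, subsN_eq_nil (by rw [PySem.List.length_pyRange_one]; omega)]
  simp

def bstepF (a b : List Int) (k : Int) : List (PySem.Set Int) → Int → List (PySem.Set Int) :=
  fun sm m =>
    (PySem.List.pyRange k 0 (-1)).foldl
      (fun (sm : List (PySem.Set Int)) c =>
        sm.set c.toNat
          ((sm.getD (c - 1).toNat PySem.Set.empty).foldl
            (fun (t : PySem.Set Int) s => PySem.Set.add t (s + (PySem.List.pyGetD a m 0 + PySem.List.pyGetD b m 0)))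
            (sm.getD c.toNat PySem.Set.empty))) sm

def binit (k : Int) : List (PySem.Set Int) :=
  (List.replicate (k.toNat + 1) (PySem.Set.empty : PySem.Set Int)).set 0 (PySem.Set.add PySem.Set.empty 0)

theorem baseB_eq (v : List Bool) (a b : List Int) (N : Int) :
    (PySem.List.pyRange 0 N 1).foldl
      (fun (acc : Int) i => acc + (if PySem.List.pyGetD v i false then PySem.List.pyGetD a i 0 else -PySem.List.pyGetD b i 0)) 0
    = baseSS v a b N := by
  rw [foldadd, zero_add]
  unfold baseSS tvalS
  rfl

theorem wval_ne_nil (v : List Bool) (a b : List Int) (N lo : Int) (S : List Int) (h : S ≠ []) :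
    wval v a b N lo S
      = baseSS v a b N + (S.map (dvalS a b)).sum - qsum v a b lo (S.getLastD 0 + 1) := by
  cases S with
  | nil => exact absurd rfl h
  | cons x t => rfl

-- DP invariant: after scanning [index, u), sums[c] holds exactly the c-subset pick sums
theorem bloop (a b : List Int) (N index k : Int) (hk1 : 0 < k) :
    ∀ (tn : Nat) (u : Int), u - index = (tn : Int) → index ≤ u → u ≤ N →
      ((PySem.List.pyRange index u 1).foldl (bstepF a b k) (binit k)).length = k.toNat + 1
      ∧ ∀ c : Nat, c ≤ k.toNat → ∀ x : Int,
          (x ∈ ((PySem.List.pyRange index u 1).foldl (bstepF a b k) (binit k)).getD c PySem.Set.empty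
            ↔ ∃ S ∈ subsN c (PySem.List.pyRange index u 1), x = (S.map (dvalS a b)).sum) := by
  intro tn
  induction tn with
  | zero =>
      intro u hu h1 h2
      have huI : u = index := by omega
      subst huI
      rw [PySem.List.pyRange_one_eq_nil (le_refl u), List.foldl_nil]
      refine ⟨by unfold binit; simp, ?_⟩
      intro c hc x
      show x ∈ (binit k).getD c PySem.Set.empty ↔ _
      unfold binit
      cases c with
      | zero =>
          rw [getD_set_self _ _ _ (by simp), subsN_zero]
          simp [PySem.Set.empty]
      | succ cc =>
          rw [getD_set_ne _ _ _ _ (by omega),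
              subsN_eq_nil (n := cc + 1) (by simp)]
          have : (List.replicate (k.toNat + 1) (PySem.Set.empty : PySem.Set Int)).getD (cc+1) PySem.Set.empty
              = PySem.Set.empty := by
            rw [List.getD_eq_getElem?_getD]
            rcases Nat.lt_or_ge (cc+1) (k.toNat + 1) with h | h
            · rw [List.getElem?_replicate_of_lt h]; rfl
            · rw [List.getElem?_eq_none (by simpa using h)]; rfl
          rw [this]
          simp [PySem.Set.empty]
  | succ tn ih =>
      intro u hu h1 h2
      have h1' : index ≤ u - 1 := by omega
      obtain ⟨ihlen, ihmem⟩ := ih (u - 1) (by omega) (by omega) (by omega)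
      have hsplit : PySem.List.pyRange index u 1
          = PySem.List.pyRange index (u - 1) 1 ++ [u - 1] := by
        have := PySem.List.pyRange_one_succ_right (a := index) (b := u - 1) h1'
        simpa using this
      rw [hsplit, List.foldl_append, List.foldl_cons, List.foldl_nil]
      set st := (PySem.List.pyRange index (u - 1) 1).foldl (bstepF a b k) (binit k) with hst
      set m := u - 1 with hm
      have hdd : PySem.List.pyGetD a m 0 + PySem.List.pyGetD b m 0 = dvalS a b m := rfl
      obtain ⟨icj, iclen⟩ := inner_char (PySem.List.pyGetD a m 0 + PySem.List.pyGetD b m 0)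
        k.toNat k st rfl (by rw [ihlen]; omega)
      refine ⟨?_, ?_⟩
      · show (bstepF a b k st m).length = k.toNat + 1
        unfold bstepF
        rw [iclen, ihlen]
      · intro c hc x
        show x ∈ (bstepF a b k st m).getD c PySem.Set.empty ↔ _
        unfold bstepF
        rw [icj c]
        cases c with
        | zero =>
            rw [if_neg (by omega)]
            rw [ihmem 0 (by omega) x]
            rw [subsN_zero, subsN_zero]
        | succ cc =>
            rw [if_pos (by constructor <;> omega)]
            rw [mem_addlist]
            have hcc : cc + 1 - 1 = cc := by omega
            rw [hcc]
            constructor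
            · rintro (hx | ⟨s, hs, rfl⟩)
              · rcases (ihmem (cc+1) hc x).mp hx with ⟨S, hS, rfl⟩
                exact ⟨S, (mem_subsN_snoc cc _ _ _).mpr (Or.inl hS), rfl⟩
              · rcases (ihmem cc (by omega) s).mp hs with ⟨S', hS', rfl⟩
                refine ⟨S' ++ [m], (mem_subsN_snoc cc _ _ _).mpr (Or.inr ⟨S', hS', rfl⟩), ?_⟩
                rw [List.map_append, List.sum_append]
                simp [hdd]
            · rintro ⟨S, hS, rfl⟩
              rcases (mem_subsN_snoc cc _ _ _).mp hS with hS | ⟨S', hS', rfl⟩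
              · exact Or.inl ((ihmem (cc+1) hc _).mpr ⟨S, hS, rfl⟩)
              · refine Or.inr ⟨(S'.map (dvalS a b)).sum, (ihmem cc (by omega) _).mpr ⟨S', hS', rfl⟩, ?_⟩
                rw [List.map_append, List.sum_append]
                simp [hdd]

-- with no visit marks in [index, N) the correction term of wval vanishes
theorem qsum_zero (v : List Bool) (a b : List Int) (N index lo hi : Int)
    (hvz : ∀ j ∈ PySem.List.pyRange index N 1, PySem.List.pyGetD v j false = false)
    (hlo : index ≤ lo) (hhi : hi ≤ N) :
    qsum v a b lo hi = 0 := by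
  unfold qsum
  apply List.sum_eq_zero
  intro x hx
  rcases List.mem_map.mp hx with ⟨j, hj, rfl⟩
  have hb := PySem.List.mem_pyRange_one.mp hj
  rw [hvz j (PySem.List.mem_pyRange_one.mpr (by omega))]
  simp

theorem solveB_base (depth index N : Int) (skill : List (List Int)) (v : List Bool)
    (a b : List Int) (r : Int) (hd : depth = PySem.Int.floordiv N 2) :
    solve_alt depth index N skill v a b r = specFold N a b depth index v r := by
  simp only [solve_alt]
  rw [if_pos hd, baseB_eq, specFold_base N a b depth index v r hd, min_comm]

theorem solveB_trivial (depth index N : Int) (skill : List (List Int)) (v : List Bool)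
    (a b : List Int) (r : Int) (hd : ¬ depth = PySem.Int.floordiv N 2)
    (hc : PySem.Int.floordiv N 2 - depth < 0 ∨ N - index < PySem.Int.floordiv N 2 - depth) :
    solve_alt depth index N skill v a b r = r := by
  simp only [solve_alt]
  rw [if_neg hd, if_pos hc]

theorem solveB_main (depth index N : Int) (skill : List (List Int)) (v : List Bool)
    (a b : List Int) (r : Int) (hd : ¬ depth = PySem.Int.floordiv N 2)
    (hk : 0 < PySem.Int.floordiv N 2 - depth)
    (hkn : PySem.Int.floordiv N 2 - depth ≤ N - index)
    (hvz : ∀ j ∈ PySem.List.pyRange index N 1, PySem.List.pyGetD v j false = false) :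
    solve_alt depth index N skill v a b r = specFold N a b depth index v r := by
  simp only [solve_alt]
  rw [if_neg hd, if_neg (by omega :
    ¬ (PySem.Int.floordiv N 2 - depth < 0 ∨ N - index < PySem.Int.floordiv N 2 - depth))]
  rw [baseB_eq]
  set k := PySem.Int.floordiv N 2 - depth with hkdef
  obtain ⟨hlen, hmem⟩ := bloop a b N index k hk (N - index).toNat N (by omega) (by omega) (le_refl N)
  show (((PySem.List.pyRange index N 1).foldl (bstepF a b k) (binit k)).getD k.toNat PySem.Set.empty).foldl
      (fun (bb : Int) s => min bb |baseSS v a b N + s|) r = _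
  rw [foldmin_map]
  rw [foldmin_mem_eq
        ((((PySem.List.pyRange index N 1).foldl (bstepF a b k) (binit k)).getD k.toNat PySem.Set.empty).map
          (fun s => |baseSS v a b N + s|))
        (((subsN k.toNat (PySem.List.pyRange index N 1)).map
            (fun S => (S.map (dvalS a b)).sum)).map
          (fun s => |baseSS v a b N + s|))
        r
        (fun x => mem_map_congr _ _ _
          (fun y => by
            rw [hmem k.toNat (le_refl _) y]
            simp [List.mem_map, eq_comm]) x)]
  rw [List.map_map]
  have e3 : ((subsN k.toNat (PySem.List.pyRange index N 1)).map
        ((fun s => |baseSS v a b N + s|) ∘ (fun S => (S.map (dvalS a b)).sum)))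
      = (subsN k.toNat (PySem.List.pyRange index N 1)).map
          (fun S => |wval v a b N index S|) := by
    apply List.map_congr_left
    intro S hS
    obtain ⟨kk, hkk⟩ : ∃ kk, k.toNat = kk + 1 := ⟨k.toNat - 1, by omega⟩
    rw [hkk] at hS
    have hne : S ≠ [] := mem_subsN_ne_nil hS
    have hsub := subsN_sublist hS
    have hml := getLastD_mem hne
    have hlast := PySem.List.mem_pyRange_one.mp (hsub.subset hml)
    simp only [Function.comp_apply]
    rw [wval_ne_nil v a b N index S hne,
        qsum_zero v a b N index index (S.getLastD 0 + 1) hvz (le_refl _) (by omega)]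
    ring_nf
  rw [e3]
  unfold specFold
  rw [if_neg (by omega)]

-- ===== VERDICT (by name: the statement is the Claim_ definition above) =====
theorem solve_spec : Claim_equal_solve := by
  unfold Claim_equal_solve
  intro depth index N skill visited a_skill b_skill result _hDom hPre
  unfold Spec_solve
  by_cases hd : depth = PySem.Int.floordiv N 2
  · rw [solveA_base depth index N skill visited a_skill b_skill result hd,
        solveB_base depth index N skill visited a_skill b_skill result hd]
  · unfold Pre_solve at hPre
    rcases hPre with ⟨hd', _⟩ | ⟨_, hcase⟩
    · exact absurd hd' hd
    · rcases hcase with hNi | ⟨h0, hlen, hmain⟩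
      · rw [solveA_empty depth index N skill visited a_skill b_skill result hd hNi,
            solveB_trivial depth index N skill visited a_skill b_skill result hd (by omega)]
      · by_cases hneg : PySem.Int.floordiv N 2 - depth < 0
        · rw [solveA_eq N skill a_skill b_skill (N - index).toNat depth index visited result
                (le_refl _) h0 hlen,
              solveB_trivial depth index N skill visited a_skill b_skill result hd (Or.inl hneg)]
          exact specFold_neg N a_skill b_skill depth index visited result hneg
        · by_cases hshort : N - index < PySem.Int.floordiv N 2 - depth
          · rw [solveA_eq N skill a_skill b_skill (N - index).toNat depth index visited result
                  (le_refl _) h0 hlen,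
                solveB_trivial depth index N skill visited a_skill b_skill result hd (Or.inr hshort)]
            exact specFold_short N a_skill b_skill depth index visited result hd hneg hshort
          · obtain ⟨_, _, hvz⟩ := hmain ⟨by omega, by omega⟩
            rw [solveA_eq N skill a_skill b_skill (N - index).toNat depth index visited result
                  (le_refl _) h0 hlen,
                solveB_main depth index N skill visited a_skill b_skill result hd (by omega) (by omega) hvz]
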